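-- pv_equiv track=rewrite | github.com/sy159/invite_code | utils.py | code_to_id
-- ===== SOURCE A (Python) =====
-- CHARS = ['5', 'd', 'f', 'u', 'c', 'y', 'a', 'r', '1', 'j',
--          '2', 't', 'x', 'w', 'g', 's', '8', 'm', 'v', 'p',
--          '4', 'q', 'h', 'b', '3', 'n', '6', 'k', '7', 'e',
--          'z', '9']
--
-- CHAR_LEN = len(CHARS)
--
-- DIVIDER = 'i'  # 分割标识(区分补位，应该是chars里面没出现的字符)
--
-- def code_to_id(code: str) -> int:
--     if not code:
--         return 0
--     code = str(code)
--     res_id = 0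
--     try:
--         for i in range(len(code)):
--             if code[i] == DIVIDER:
--                 break
--             try:
--                 char_index = CHARS.index(code[i])
--             except ValueError as e:
--                 char_index = 0
--             if i > 0:
--                 res_id = res_id * CHAR_LEN + char_index
--             else:
--                 res_id = char_index
--     except Exception as e:
--         pass
--     return res_id
-- ===== SOURCE B (Python) =====
-- CHARS = ['5', 'd', 'f', 'u', 'c', 'y', 'a', 'r', '1', 'j',
--          '2', 't', 'x', 'w', 'g', 's', '8', 'm', 'v', 'p',
--          '4', 'q', 'h', 'b', '3', 'n', '6', 'k', '7', 'e',
--          'z', '9']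
--
-- CHAR_LEN = len(CHARS)
--
-- DIVIDER = 'i'
--
--
-- def code_to_id(code: str) -> int:
--     if not code:
--         return 0
--     code = str(code)
--     cut = code.find(DIVIDER)
--     prefix = code if cut == -1 else code[:cut]
--     total = 0
--     power = 1
--     for c in reversed(prefix):
--         if c in CHARS:
--             total += CHARS.index(c) * power
--         power *= CHAR_LEN
--     return total
-- ===== Notes on version B (the rewrite author's own statement) =====
-- stated objective: alternative
-- what changed: Replaces the forward Horner multiply-accumulate loop (with an in-loop break at the divider and per-char try/except) by first cutting the prefix at the first divider via str.find and a slice, then scanning that prefix back-to-front while maintaining an explicit place-value power.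
import Mathlib
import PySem

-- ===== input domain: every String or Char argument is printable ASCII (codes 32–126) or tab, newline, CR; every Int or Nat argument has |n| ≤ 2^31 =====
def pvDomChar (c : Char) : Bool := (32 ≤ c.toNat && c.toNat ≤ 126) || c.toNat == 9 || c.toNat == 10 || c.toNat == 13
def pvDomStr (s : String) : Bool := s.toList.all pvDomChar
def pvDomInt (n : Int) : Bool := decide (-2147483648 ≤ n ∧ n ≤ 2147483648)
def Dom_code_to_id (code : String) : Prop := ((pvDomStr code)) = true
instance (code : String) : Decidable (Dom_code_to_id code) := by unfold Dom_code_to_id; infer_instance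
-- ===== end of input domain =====

-- B cuts the prefix at the first divider with find+slice and then scans it back-to-front
-- with an explicit place-value power, instead of A's forward Horner loop with an in-loop break.
-- Objective: alternative (same cost, different shape).

-- module constant CHARS (shared by both ports, as in the Python module)
def pyCHARS : List Char := ['5', 'd', 'f', 'u', 'c', 'y', 'a', 'r', '1', 'j',
                            '2', 't', 'x', 'w', 'g', 's', '8', 'm', 'v', 'p',
                            '4', 'q', 'h', 'b', '3', 'n', '6', 'k', '7', 'e',
                            'z', '9']

-- ===== PORT A =====
-- try: CHARS.index(code[i]) except ValueError: char_index = 0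
def charIdxA (c : Char) : Int :=
  match PySem.List.index? pyCHARS c with
  | some i => (i : Int)
  | none => 0

-- A's for-loop: i is the loop index, res the accumulator; break at DIVIDER
def codeLoopA : List Char → Nat → Int → Int
  | [], _, res => res
  | c :: cs, i, res =>
    if c = 'i' then res
    else codeLoopA cs (i + 1)
           (if 0 < i then res * (pyCHARS.length : Int) + charIdxA c else charIdxA c)

def code_to_id (code : String) : Int :=
  if code.toList = [] then 0 else codeLoopA code.toList 0 0

-- ===== PORT B =====
-- B's for-loop over reversed(prefix), state (total, power)
def revLoopB : List Char → Int → Int → Int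
  | [], total, _ => total
  | c :: cs, total, power =>
    revLoopB cs
      (if c ∈ pyCHARS then total + ((PySem.List.index? pyCHARS c).getD 0 : Int) * power
       else total)
      (power * (pyCHARS.length : Int))

-- cut = code.find('i'); prefix = code if cut == -1 else code[:cut]; loop over reversed(prefix)
def code_to_id_alt (code : String) : Int :=
  if code.toList = [] then 0
  else
    revLoopB
      ((if PySem.Chars.find code.toList ['i'] = -1 then code.toList
        else PySem.List.slice code.toList none
               (some (PySem.Chars.find code.toList ['i']))).reverse)
      0 1

-- ===== PRECONDITION & SPEC =====
def Spec_code_to_id (code : String) (out : Int) : Prop := out = code_to_id_alt code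
instance (code : String) (out : Int) : Decidable (Spec_code_to_id code out) := by unfold Spec_code_to_id; infer_instance

-- ===== CLAIM (what is proved, stated in full; the proofs are below) =====
def Claim_equal_code_to_id : Prop := ∀ (code : String), Dom_code_to_id code → Spec_code_to_id code (code_to_id code)

-- ===== LEMMAS AND PROOFS =====

-- place-value sum of a digit list, most significant first (what both loops compute on the prefix)
def pvS : List Char → Int
  | [] => 0
  | c :: cs => charIdxA c * 32 ^ cs.length + pvS cs

-- the same sum, least significant first (Horner on the reversed list)
def pvV : List Char → Int
  | [] => 0
  | c :: cs => charIdxA c + 32 * pvV cs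

lemma pyCHARS_len : (pyCHARS.length : Int) = 32 := by decide

-- B's guarded lookup agrees with A's try/except lookup
lemma idxB_eq (c : Char) :
    (if c ∈ pyCHARS then ((PySem.List.index? pyCHARS c).getD 0 : Int) else 0) = charIdxA c := by
  unfold charIdxA
  cases hi : PySem.List.index? pyCHARS c with
  | some k =>
    have hmem : c ∈ pyCHARS :=
      (PySem.List.index?_isSome_iff pyCHARS c).1 (by rw [hi]; rfl)
    rw [if_pos hmem]
    rfl
  | none =>
    have hmem : c ∉ pyCHARS := (PySem.List.index?_eq_none_iff pyCHARS c).1 hi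
    rw [if_neg hmem]

lemma loopA_eq : ∀ (cs : List Char) (i : Nat) (res : Int),
    codeLoopA cs (i + 1) res
      = res * 32 ^ (cs.takeWhile (fun c => c != 'i')).length
        + pvS (cs.takeWhile (fun c => c != 'i')) := by
  intro cs
  induction cs with
  | nil => intro i res; simp [codeLoopA, pvS]
  | cons c cs ih =>
    intro i res
    by_cases hc : c = 'i'
    · simp [codeLoopA, hc, pvS]
    · simp only [codeLoopA, if_neg hc, List.takeWhile_cons,
        show (c != 'i') = true by simp [hc], if_pos (Nat.succ_pos i), pyCHARS_len]
      rw [ih (i + 1)]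
      simp only [if_pos, List.length_cons, pvS]
      ring

lemma revLoopB_eq : ∀ (ys : List Char) (t p : Int),
    revLoopB ys t p = t + p * pvV ys := by
  intro ys
  induction ys with
  | nil => intro t p; simp [revLoopB, pvV]
  | cons c cs ih =>
    intro t p
    simp only [revLoopB, pyCHARS_len]
    rw [ih]
    by_cases hm : c ∈ pyCHARS
    · have h : ((PySem.List.index? pyCHARS c).getD 0 : Int) = charIdxA c := by
        rw [← idxB_eq c, if_pos hm]
      rw [if_pos hm, h]
      simp only [pvV]; ring
    · have h : charIdxA c = 0 := by rw [← idxB_eq c, if_neg hm]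
      rw [if_neg hm]
      simp only [pvV, h]; ring

lemma pvV_append (ys : List Char) (c : Char) :
    pvV (ys ++ [c]) = pvV ys + charIdxA c * 32 ^ ys.length := by
  induction ys with
  | nil => simp [pvV]
  | cons d ds ih => simp only [List.cons_append, pvV, ih, List.length_cons, pow_succ]; ring

lemma pvV_reverse : ∀ (xs : List Char), pvV xs.reverse = pvS xs := by
  intro xs
  induction xs with
  | nil => rfl
  | cons c cs ih =>
    simp only [List.reverse_cons, pvV_append, ih, pvS, List.length_reverse]
    ring

-- ['i'] is a prefix of l.drop i exactly when l[i]? = 'i'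
lemma prefix_singleton_drop (l : List Char) (i : Nat) :
    ['i'] <+: l.drop i ↔ l[i]? = some 'i' := by
  rw [← List.head?_drop]
  cases h : l.drop i with
  | nil => simp
  | cons a t => simp [List.cons_prefix_cons, eq_comm]

lemma take_eq_takeWhile (l : List Char) (n : Nat)
    (hn : l[n]? = some 'i') (hmin : ∀ i, i < n → l[i]? ≠ some 'i') :
    l.take n = l.takeWhile (fun c => c != 'i') := by
  induction l generalizing n with
  | nil => simp at hn
  | cons c cs ih =>
    cases n with
    | zero =>
      simp only [List.getElem?_cons_zero, Option.some.injEq] at hn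
      simp [hn]
    | succ m =>
      have hc : c ≠ 'i' := by
        intro h; exact hmin 0 (Nat.succ_pos m) (by simp [h])
      simp only [List.take_succ_cons, List.takeWhile_cons,
        show (c != 'i') = true by simp [hc], if_pos]
      rw [ih m (by simpa using hn)
        (fun i hi => by simpa using hmin (i + 1) (Nat.succ_lt_succ hi))]

-- B's find+slice prefix is the part of the string before the first divider
lemma prefix_eq_takeWhile (l : List Char) :
    (if PySem.Chars.find l ['i'] = -1 then l
     else PySem.List.slice l none (some (PySem.Chars.find l ['i'])))
      = l.takeWhile (fun c => c != 'i') := by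
  by_cases h : PySem.Chars.find l ['i'] = -1
  · have hnin : 'i' ∉ l := by
      intro hm
      exact (PySem.Chars.find_eq_neg_one_iff l ['i']).1 h
        ((List.singleton_infix_iff 'i' l).2 hm)
    rw [if_pos h, List.takeWhile_eq_self_iff.2]
    intro a ha
    have : a ≠ 'i' := fun hai => hnin (hai ▸ ha)
    simpa using this
  · have hpos : 0 ≤ PySem.Chars.find l ['i'] := by
      have := PySem.Chars.neg_one_le_find (s := l) (sub := ['i'])
      omega
    obtain ⟨hpre, hmin⟩ := PySem.Chars.find_spec hpos
    have hcast : PySem.Chars.find l ['i'] = ((PySem.Chars.find l ['i']).toNat : Int) :=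
      (Int.toNat_of_nonneg hpos).symm
    rw [if_neg h, hcast, PySem.List.slice_to_natCast]
    exact take_eq_takeWhile l _ ((prefix_singleton_drop l _).1 hpre)
      (fun i hi hib => hmin i hi ((prefix_singleton_drop l i).2 hib))

-- ===== VERDICT (by name: the statement is the Claim_ definition above) =====
theorem code_to_id_spec : Claim_equal_code_to_id := by
  intro code _
  unfold Spec_code_to_id code_to_id code_to_id_alt
  by_cases hE : code.toList = []
  · simp [hE]
  · rw [if_neg hE, if_neg hE, prefix_eq_takeWhile, revLoopB_eq, pvV_reverse]
    cases hl : code.toList with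
    | nil => exact absurd hl hE
    | cons c cs =>
      by_cases hc : c = 'i'
      · simp [codeLoopA, hc, pvS]
      · simp only [codeLoopA, if_neg hc, if_neg (lt_irrefl 0), List.takeWhile_cons,
          show (c != 'i') = true by simp [hc], if_pos]
        rw [loopA_eq]
        simp only [pvS]
        ring
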